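-- pv_equiv track=rewrite | github.com/LeChen1234/badmintonv3 | scripts/export_threshold_previews.py | parse_percentiles
-- ===== SOURCE A (Python) =====
-- def parse_percentiles(text: str) -> list[int]:
--     vals = []
--     for part in text.split(","):
--         part = part.strip()
--         if not part:
--             continue
--         v = int(part)
--         if 0 <= v <= 100:
--             vals.append(v)
--     vals = sorted(set(vals))
--     if not vals:
--         raise ValueError("No valid percentiles found")
--     return vals
-- ===== SOURCE B (Python) =====
-- def parse_percentiles(text: str) -> list[int]:
--     parts = [p.strip() for p in text.split(",")]
--     nums = [int(p) for p in parts if p]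
--     mask = 0
--     for v in nums:
--         if 0 <= v <= 100:
--             mask |= 1 << v
--     if mask == 0:
--         raise ValueError("No valid percentiles found")
--     return [i for i in range(101) if (mask >> i) & 1]
-- ===== Notes on version B (the rewrite author's own statement) =====
-- stated objective: alternative
-- what changed: Replaces the single accumulate-then-sorted(set(...)) loop with a staged pipeline: comprehensions strip and parse all parts, an integer bitmask records the in-range values, and the sorted deduplicated result is read off the bits of 0..100 with no sort and no set.
import Mathlib
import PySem

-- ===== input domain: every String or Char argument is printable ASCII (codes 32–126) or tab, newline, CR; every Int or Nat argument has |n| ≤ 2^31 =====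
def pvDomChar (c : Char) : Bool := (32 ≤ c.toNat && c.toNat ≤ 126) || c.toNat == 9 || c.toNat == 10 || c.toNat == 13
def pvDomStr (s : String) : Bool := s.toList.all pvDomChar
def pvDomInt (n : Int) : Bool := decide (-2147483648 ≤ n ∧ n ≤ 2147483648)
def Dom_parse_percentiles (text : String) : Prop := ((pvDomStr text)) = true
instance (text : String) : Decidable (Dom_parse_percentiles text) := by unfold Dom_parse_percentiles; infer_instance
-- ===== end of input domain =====

-- B replaces the single accumulate-then-sorted(set(...)) loop with staged comprehensions
-- (strip all parts, parse the nonblank ones), an integer bitmask of the in-range values,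
-- and a read-off of the bits of 0..100; equivalence proved on inputs where A returns.

-- ===== PORT A =====
-- the for-loop of A: collect valid values in order; none = int(part) raised ValueError
def pvLoopA : List String → List Int → Option (List Int)
  | [], vals => some vals
  | part :: rest, vals =>
    let p := PySem.Str.strip part
    if p = "" then pvLoopA rest vals
    else
      match PySem.Int.ofStr? p with
      | none => none
      | some v => pvLoopA rest (if 0 ≤ v ∧ v ≤ 100 then vals ++ [v] else vals)

def parse_percentiles (text : String) : List Int :=
  match pvLoopA ((PySem.Str.split? text ",").getD []) [] with
  | none => []   -- int(part) raised ValueError: outside Pre_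
  | some vals => PySem.List.sorted (PySem.Set.ofList vals) (fun x => x) false
  -- if the result is empty A raises ValueError: outside Pre_

-- ===== PORT B =====
-- the comprehension [int(p) for p in parts if p] applied after the filter: parse every
-- element in order; none = int(p) raised ValueError
def pvParseAll : List String → Option (List Int)
  | [] => some []
  | p :: rest =>
    match PySem.Int.ofStr? p with
    | none => none
    | some v => (pvParseAll rest).map (v :: ·)

def parse_percentiles_alt (text : String) : List Int :=
  let parts := ((PySem.Str.split? text ",").getD []).map PySem.Str.strip
  match pvParseAll (parts.filter (fun p => !(p == ""))) with
  | none => []   -- int(p) raised ValueError: outside Pre_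
  | some nums =>
    let mask : Nat :=
      nums.foldl (fun (m : Nat) (v : Int) => if 0 ≤ v ∧ v ≤ 100 then m ||| (1 <<< v.toNat) else m) 0
    -- '(mask >> i) & 1' is truthy iff bit i of mask is set; mask and i are nonnegative,
    -- so Nat.testBit is exact here
    (PySem.List.pyRange 0 101 1).filter (fun i => Nat.testBit mask i.toNat)
  -- if mask == 0 B raises ValueError: outside Pre_

-- ===== PRECONDITION & SPEC =====
-- Pre_ excludes exactly the inputs on which A raises: some nonblank comma part is not a
-- valid int literal (int() raises ValueError), or no part yields a value in 0..100
-- (A raises ValueError "No valid percentiles found").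
def Pre_parse_percentiles (text : String) : Prop :=
  (((PySem.Str.split? text ",").getD []).all fun part =>
      (PySem.Str.strip part == "") || (PySem.Int.ofStr? (PySem.Str.strip part)).isSome) = true ∧
  (((PySem.Str.split? text ",").getD []).any fun part =>
      decide (0 ≤ ((PySem.Int.ofStr? (PySem.Str.strip part)).getD (-1)) ∧
              ((PySem.Int.ofStr? (PySem.Str.strip part)).getD (-1)) ≤ 100)) = true

instance (text : String) : Decidable (Pre_parse_percentiles text) := by
  unfold Pre_parse_percentiles; infer_instance

def pvWitness_parse_percentiles : String := "5, 3 ,5"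

def Spec_parse_percentiles (text : String) (out : List Int) : Prop := out = parse_percentiles_alt text
instance (text : String) (out : List Int) : Decidable (Spec_parse_percentiles text out) := by
  unfold Spec_parse_percentiles; infer_instance

-- ===== CLAIM (what is proved, stated in full; the proofs are below) =====
def Claim_equal_parse_percentiles : Prop := ∀ (text : String), Dom_parse_percentiles text → Pre_parse_percentiles text → Spec_parse_percentiles text (parse_percentiles text)

-- ===== LEMMAS AND PROOFS =====

-- A's loop in terms of B's staged pipeline: strip, keep the nonblank parts, parse them
-- all, then filter by the range check
theorem pvLoopA_eq (parts : List String) (acc : List Int) :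
    pvLoopA parts acc
    = (pvParseAll ((parts.map PySem.Str.strip).filter (fun p => !(p == "")))).map
        (fun nums => acc ++ nums.filter (fun v => decide (0 ≤ v ∧ v ≤ 100))) := by
  induction parts generalizing acc with
  | nil => simp [pvLoopA, pvParseAll]
  | cons part rest ih =>
    simp only [pvLoopA, List.map_cons, List.filter_cons]
    by_cases hp : PySem.Str.strip part = ""
    · simp only [hp]
      simpa using ih acc
    · have hb : (!(PySem.Str.strip part == "")) = true := by simp [hp]
      simp only [if_neg hp, hb, if_pos]
      cases hof : PySem.Int.ofStr? (PySem.Str.strip part) with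
      | none => simp [pvParseAll, hof]
      | some v =>
        simp only [pvParseAll, hof]
        by_cases hv : 0 ≤ v ∧ v ≤ 100
        · rw [if_pos hv, ih]
          cases pvParseAll ((rest.map PySem.Str.strip).filter (fun p => !(p == ""))) with
          | none => rfl
          | some nums => simp [hv]
        · rw [if_neg hv, ih]
          cases pvParseAll ((rest.map PySem.Str.strip).filter (fun p => !(p == ""))) with
          | none => rfl
          | some nums => simp [hv]

-- bit i of B's mask is set iff i occurs among the in-range parsed values
theorem pvMask_testBit (nums : List Int) (m : Nat) (i : Nat) :
    Nat.testBit (nums.foldl (fun (m : Nat) (v : Int) => if 0 ≤ v ∧ v ≤ 100 then m ||| (1 <<< v.toNat) else m) m) i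
    = (Nat.testBit m i ||
       decide ((i : Int) ∈ nums.filter (fun v => decide (0 ≤ v ∧ v ≤ 100)))) := by
  induction nums generalizing m with
  | nil => simp
  | cons v rest ih =>
    simp only [List.foldl_cons, List.filter_cons]
    by_cases hv : 0 ≤ v ∧ v ≤ 100
    · rw [if_pos hv, ih]
      have h1 : (1 <<< v.toNat) = 2 ^ v.toNat := by
        rw [Nat.shiftLeft_eq, one_mul]
      rw [Nat.testBit_or, h1, Nat.testBit_two_pow]
      have : ((i : Int) = v) ↔ (v.toNat = i) := by
        constructor <;> intro h <;> omega
      simp only [hv]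
      by_cases hiv : (i : Int) = v
      · simp [hiv, this.mp hiv]
      · have : ¬ (v.toNat = i) := fun h => hiv (this.mpr h)
        simp [hiv, this]
    · rw [if_neg hv, ih]
      simp [hv]

-- sorted(set(vals)) is the ordered read-off of the bits of 0..100 when the mask's bits
-- mark exactly the members of vals
theorem pvSorted_eq_bits (vals : List Int) (mask : Nat)
    (hvals : ∀ v ∈ vals, 0 ≤ v ∧ v ≤ 100)
    (hrel : ∀ i : Nat, Nat.testBit mask i = decide ((i : Int) ∈ vals)) :
    PySem.List.sorted (PySem.Set.ofList vals) (fun x => x) false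
    = (PySem.List.pyRange 0 101 1).filter (fun i => Nat.testBit mask i.toNat) := by
  apply PySem.List.sorted_eq_of_perm_of_pairwise_lt
  · have hmem : ∀ x : Int,
        x ∈ (PySem.List.pyRange 0 101 1).filter (fun i => Nat.testBit mask i.toNat)
        ↔ x ∈ PySem.Set.ofList vals := by
      intro x
      rw [List.mem_filter, PySem.Set.mem_ofList, PySem.List.mem_pyRange_one]
      constructor
      · rintro ⟨⟨h0, _⟩, hg⟩
        rw [hrel x.toNat] at hg
        rwa [Int.toNat_of_nonneg h0, decide_eq_true_iff] at hg
      · intro hx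
        have hb := hvals x hx
        refine ⟨⟨hb.1, by omega⟩, ?_⟩
        rw [hrel x.toNat, Int.toNat_of_nonneg hb.1]
        simpa using hx
    have hnd1 : ((PySem.List.pyRange 0 101 1).filter
        (fun i => Nat.testBit mask i.toNat)).Nodup :=
      (PySem.List.nodup_pyRange_one 0 101).filter _
    have hnd2 : (PySem.Set.ofList vals).Nodup := PySem.Set.nodup_ofList vals
    apply List.perm_of_nodup_nodup_toFinset_eq hnd1 hnd2
    apply Finset.ext
    intro a
    simp only [List.mem_toFinset]
    exact hmem a
  · exact (PySem.List.pairwise_lt_pyRange_one 0 101).filter _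

-- under Pre_'s first conjunct every element of the parse comprehension succeeds
theorem pvParseAll_isSome (l : List String)
    (hok : ∀ p ∈ l, (PySem.Int.ofStr? p).isSome) : (pvParseAll l).isSome := by
  induction l with
  | nil => simp [pvParseAll]
  | cons p rest ih =>
    simp only [pvParseAll]
    cases hof : PySem.Int.ofStr? p with
    | none =>
      have := hok p (by simp)
      simp [hof] at this
    | some v =>
      have := ih (fun q hq => hok q (by simp [hq]))
      cases h : pvParseAll rest with
      | none => simp [h] at this
      | some nums => simp

-- ===== VERDICT (by name: the statement is the Claim_ definition above) =====
theorem parse_percentiles_spec : Claim_equal_parse_percentiles := by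
  intro text _ hpre
  unfold Spec_parse_percentiles parse_percentiles parse_percentiles_alt
  rw [pvLoopA_eq]
  cases hp : pvParseAll ((((PySem.Str.split? text ",").getD []).map PySem.Str.strip).filter
      (fun p => !(p == ""))) with
  | none =>
    exfalso
    have hsome : (pvParseAll ((((PySem.Str.split? text ",").getD []).map PySem.Str.strip).filter
        (fun p => !(p == "")))).isSome := by
      apply pvParseAll_isSome
      intro p hpmem
      rcases List.mem_filter.mp hpmem with ⟨hmap, hne⟩
      rcases List.mem_map.mp hmap with ⟨part, hpart, rfl⟩
      have := (List.all_eq_true.mp hpre.1) part hpart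
      rw [Bool.or_eq_true, beq_iff_eq] at this
      rcases this with h | h
      · simp [h] at hne
      · exact h
    rw [hp] at hsome
    simp at hsome
  | some nums =>
    simp only [hp, Option.map_some, List.nil_append]
    apply pvSorted_eq_bits
    · intro v hv
      have := (List.mem_filter.mp hv).2
      simpa using this
    · intro i
      rw [pvMask_testBit]
      simp
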